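-- pv_equiv track=rewrite | github.com/zeeshannisar/resource-effecient-multi-stain-kidney-glomeruli-segmentation | downstream_tasks/unet/unet_with_simclr_and_byol/code/unet/unet_models.py | getvalidinputsize
-- ===== SOURCE A (Python) =====
-- import math
--
-- def getvalidinputsize(inp_shape, depth=5, k_size=3, data_format='channels_last'):
--     convolutions_per_layer = 2
--
--     if data_format not in {'channels_first', 'channels_last'}:
--         raise ValueError('Unknown data_format: ', data_format)
--
--     def calculate(dim_size):
--         # Calculate what the last feature map size would be with this patch size
--         for _ in range(depth - 1):
--             dim_size = (dim_size - ((k_size - 1) * convolutions_per_layer)) / 2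
--         dim_size -= (k_size - 1) * 2
--
--         # Minimum possible size of last feature map
--         if dim_size < 4:
--             dim_size = 4
--
--         # Round to the next smallest even number
--         dim_size = math.floor(dim_size / 2.) * 2
--         # Calculate the original patch size to give this (valid) feature map size
--         for _ in range(depth - 1):
--             dim_size = (dim_size + (k_size - 1) * convolutions_per_layer) * 2
--         dim_size += (k_size - 1) * 2
--
--         return int(dim_size)
--
--     if data_format == 'channels_last':
--         spatial_dims = range(len(inp_shape))[:-1]
--     elif data_format == 'channels_first':
--         spatial_dims = range(len(inp_shape))[1:]
--
--     inp_shape = list(inp_shape)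
--     for d in spatial_dims:
--         new_inp_shape_d = calculate(inp_shape[d])
--         if new_inp_shape_d > inp_shape[d]:
--             raise ValueError(
--                 'Minimum possible image size is larger than the original image size, increase patch resolution or patch size.')
--         inp_shape[d] = new_inp_shape_d
--
--     return tuple(inp_shape)
-- ===== SOURCE B (Python) =====
-- # Closed-form re-implementation: both per-dimension loops of `calculate` are
-- # replaced by exact integer formulas (the values A's loops manipulate are exact
-- # dyadic rationals, modelled here as num / 2**(depth-1)).
-- def getvalidinputsize(inp_shape, depth=5, k_size=3, data_format='channels_last'):
--     if data_format not in ('channels_first', 'channels_last'):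
--         raise ValueError('Unknown data_format: ', data_format)
--
--     def fit(v):
--         c = (k_size - 1) * 2
--         p = 1 << max(depth - 1, 0)
--         num = v + c - 2 * c * p                 # last feature-map size = num / p
--         m = max(4, 2 * (num // (2 * p)))        # clamp at 4, round down to even
--         s = p * m + c * (2 * p - 1)             # patch size giving feature map m
--         if s > v:
--             raise ValueError(
--                 'Minimum possible image size is larger than the original image size, increase patch resolution or patch size.')
--         return s
--
--     keep = len(inp_shape) - 1 if data_format == 'channels_last' else 0  # channel axis
--     return tuple(v if d == keep else fit(v) for d, v in enumerate(inp_shape))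
-- ===== Notes on version B (the rewrite author's own statement) =====
-- stated objective: simpler
-- what changed: Both per-dimension loops of A's `calculate` (depth-1 float halvings, then depth-1 integer doublings) are replaced by closed-form exact integer formulas (feature map = (v+c-2*c*p)/p with p = 2^(depth-1), patch = p*m + c*(2p-1)), and the in-place index loop by a single comprehension over enumerate.
-- outside the precondition, e.g. on getvalidinputsize((100, 3), 60, 0, 'channels_last'): A returns (2, 3), B returns (2, 3)
import Mathlib
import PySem

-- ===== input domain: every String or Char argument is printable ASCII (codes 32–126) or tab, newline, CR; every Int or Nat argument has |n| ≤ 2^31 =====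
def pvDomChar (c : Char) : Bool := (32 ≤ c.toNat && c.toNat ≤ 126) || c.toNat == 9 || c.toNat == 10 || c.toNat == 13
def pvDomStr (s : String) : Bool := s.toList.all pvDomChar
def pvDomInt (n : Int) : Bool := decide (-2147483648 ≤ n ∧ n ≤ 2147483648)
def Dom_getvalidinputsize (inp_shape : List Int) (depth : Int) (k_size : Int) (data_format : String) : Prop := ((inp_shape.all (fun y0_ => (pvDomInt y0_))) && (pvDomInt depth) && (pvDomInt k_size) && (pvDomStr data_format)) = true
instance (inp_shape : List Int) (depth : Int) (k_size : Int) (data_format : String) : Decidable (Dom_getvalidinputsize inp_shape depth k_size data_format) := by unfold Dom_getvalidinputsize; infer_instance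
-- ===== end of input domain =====

-- B replaces A's two per-dimension loops by closed-form exact integer formulas (objective: simpler).
-- On the admitted inputs (Pre_ below) every float A manipulates is an exact dyadic rational,
-- modelled in port A by ℚ; A's two ValueError raises are outside Pre_ (ports return the list unchanged there).

-- ===== PORT A =====
-- `calculate`: forward loop, -c, clamp at 4, floor to even, backward loop (floats modelled by ℚ, exact on Pre_)
def pvCalcA (depth k_size : Int) (d0 : Int) : Int :=
  let c : Int := (k_size - 1) * 2                    -- (k_size - 1) * convolutions_per_layer
  let x : Rat := (List.range (depth - 1).toNat).foldl (fun x _ => (x - (c : Rat)) / 2) (d0 : Rat)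
  let v : Rat := x - (c : Rat)
  let v : Rat := if v < 4 then 4 else v
  let m : Int := ⌊v / 2⌋ * 2
  let y : Int := (List.range (depth - 1).toNat).foldl (fun y _ => (y + c) * 2) m
  y + c

def getvalidinputsize (inp_shape : List Int) (depth : Int) (k_size : Int) (data_format : String) : List Int :=
  if ¬(data_format = "channels_first" ∨ data_format = "channels_last") then inp_shape  -- Python: raise ValueError (outside Pre_)
  else
    let n := inp_shape.length
    -- range(len(inp_shape))[:-1]  /  range(len(inp_shape))[1:]
    let spatial : List Nat := if data_format = "channels_last" then List.range (n - 1) else (List.range n).drop 1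
    -- in-place update loop; the ValueError raise (new size > old size) is outside Pre_, the port just sets
    spatial.foldl (fun xs d => xs.set d (pvCalcA depth k_size (xs.getD d 0))) inp_shape

-- ===== PORT B =====
-- `fit`: closed-form exact integer version of `calculate` (the feature-map value is num / p)
def pvFitB (v depth k_size : Int) : Int :=
  let c : Int := (k_size - 1) * 2
  let p : Int := 2 ^ (depth - 1).toNat              -- 1 << max(depth - 1, 0)
  let num : Int := v + c - 2 * c * p
  let m : Int := max 4 (2 * (PySem.Int.floordiv num (2 * p)))
  p * m + c * (2 * p - 1)

def getvalidinputsize_alt (inp_shape : List Int) (depth : Int) (k_size : Int) (data_format : String) : List Int :=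
  if ¬(data_format = "channels_first" ∨ data_format = "channels_last") then inp_shape  -- Python: raise ValueError (outside Pre_)
  else
    let keep : Int := if data_format = "channels_last" then (inp_shape.length : Int) - 1 else 0  -- channel axis
    -- tuple(v if d == keep else fit(v) for d, v in enumerate(inp_shape)); fit's raise is outside Pre_
    inp_shape.mapIdx (fun d v => if (d : Int) = keep then v else pvFitB v depth k_size)

-- ===== PRECONDITION & SPEC =====
-- Same closed form as B but with the power-of-two exponent clamped at 64, so that Pre_ evaluates fast;
-- on Dom the clamp never changes the predicate: for k_size ≥ 1 and (depth-1) > 64 both the clamped and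
-- the true new size exceed 2^31 ≥ v (c ≥ 0, m ≥ 4) so the bound below fails either way, and for
-- k_size ≤ 0 Pre_'s exactness conjunct already forces (depth-1) ≤ 50.
def pvClampedNew (v depth k_size : Int) : Int :=
  let c : Int := (k_size - 1) * 2
  let p : Int := 2 ^ (min (depth - 1).toNat 64)
  let num : Int := v + c - 2 * c * p
  p * (max 4 (2 * (num / (2 * p)))) + c * (2 * p - 1)

-- Pre_ excludes A's two ValueError raises (unknown data_format; computed size larger than the original
-- image) and, for non-positive k_size only, requires |k_size-1|·2^(depth-1) ≤ 2^50, inside which every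
-- float A manipulates is an exact dyadic rational; beyond that bound A's float loop rounds low-order
-- bits away (and runs up to |depth| iterations), an accident of binary64 arithmetic, not a value to
-- specify (wherever A still returns there it happens to agree with B).  For k_size ≥ 1 no such bound
-- is needed: the no-upscale condition itself keeps every intermediate float exact.
def Pre_getvalidinputsize (inp_shape : List Int) (depth : Int) (k_size : Int) (data_format : String) : Prop :=
  (data_format = "channels_first" ∨ data_format = "channels_last") ∧
  (1 ≤ k_size ∨ |k_size - 1| * 2 ^ (min (depth - 1).toNat 64) ≤ 2 ^ 50) ∧
  (∀ i : Nat, i < inp_shape.length →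
    i ≠ (if data_format = "channels_last" then inp_shape.length - 1 else 0) →
    pvClampedNew (inp_shape.getD i 0) depth k_size ≤ inp_shape.getD i 0)

instance (inp_shape : List Int) (depth : Int) (k_size : Int) (data_format : String) : Decidable (Pre_getvalidinputsize inp_shape depth k_size data_format) := by unfold Pre_getvalidinputsize; infer_instance

def pvWitness_getvalidinputsize : List Int × Int × Int × String := ([444, 284, 3], 5, 3, "channels_last")

def Spec_getvalidinputsize (inp_shape : List Int) (depth : Int) (k_size : Int) (data_format : String) (out : List Int) : Prop := out = getvalidinputsize_alt inp_shape depth k_size data_format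
instance (inp_shape : List Int) (depth : Int) (k_size : Int) (data_format : String) (out : List Int) : Decidable (Spec_getvalidinputsize inp_shape depth k_size data_format out) := by unfold Spec_getvalidinputsize; infer_instance

-- ===== CLAIM (what is proved, stated in full; the proofs are below) =====
def Claim_equal_getvalidinputsize : Prop := ∀ (inp_shape : List Int) (depth : Int) (k_size : Int) (data_format : String), Dom_getvalidinputsize inp_shape depth k_size data_format → Pre_getvalidinputsize inp_shape depth k_size data_format → Spec_getvalidinputsize inp_shape depth k_size data_format (getvalidinputsize inp_shape depth k_size data_format)

-- ===== LEMMAS AND PROOFS =====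

-- forward loop = closed form over ℚ
theorem pv_fwd (c : Int) (D : Nat) (x0 : Rat) :
    (List.range D).foldl (fun x _ => (x - (c : Rat)) / 2) x0 = (x0 + c) / 2 ^ D - c := by
  induction D with
  | zero => simp
  | succ D ih =>
      rw [List.range_succ, List.foldl_append, ih]
      simp only [List.foldl_cons, List.foldl_nil]
      field_simp
      ring

-- backward loop = closed form over ℤ
theorem pv_bwd (c : Int) (D : Nat) (m : Int) :
    (List.range D).foldl (fun y _ => (y + c) * 2) m = 2 ^ D * m + c * (2 * 2 ^ D - 2) := by
  induction D with
  | zero => simp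
  | succ D ih =>
      rw [List.range_succ, List.foldl_append, ih]
      simp only [List.foldl_cons, List.foldl_nil]
      ring

-- the two per-dimension computations agree everywhere
theorem pv_calc_eq (depth k_size d0 : Int) :
    pvCalcA depth k_size d0 = pvFitB d0 depth k_size := by
  unfold pvCalcA pvFitB
  simp only [pv_fwd, pv_bwd]
  set c : Int := (k_size - 1) * 2 with hc
  set D : Nat := (depth - 1).toNat with hD
  set num : Int := d0 + c - 2 * c * 2 ^ D with hnum
  have hpow : (0 : Rat) < 2 ^ D := by positivity
  have hpow1 : (0 : Rat) < 2 ^ (D + 1) := by positivity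
  have hv : ((d0 : Rat) + (c : Rat)) / 2 ^ D - (c : Rat) - (c : Rat) = (num : Rat) / 2 ^ D := by
    rw [hnum]
    field_simp
    push_cast
    ring
  have hq : PySem.Int.floordiv num (2 * 2 ^ D) = ⌊(num : Rat) / 2 ^ (D + 1)⌋ := by
    have h1 : ((2 ^ (D + 1) : Nat) : Rat) = (2 : Rat) ^ (D + 1) := by push_cast; ring
    rw [← h1, Rat.floor_intCast_div_natCast, PySem.Int.floordiv_eq_ediv_of_pos (by positivity)]
    congr 1
    push_cast
    ring
  have hhalf : (num : Rat) / 2 ^ D / 2 = (num : Rat) / 2 ^ (D + 1) := by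
    rw [pow_succ]
    ring
  rw [hv]
  by_cases hlt : (num : Rat) / 2 ^ D < 4
  · rw [if_pos hlt]
    have hq1 : PySem.Int.floordiv num (2 * 2 ^ D) ≤ 1 := by
      rw [hq]
      have h2 : (num : Rat) / 2 ^ (D + 1) < ((2 : Int) : Rat) := by
        rw [div_lt_iff₀ hpow1, pow_succ]
        push_cast
        nlinarith [(div_lt_iff₀ hpow).mp hlt]
      have := Int.floor_lt.mpr h2
      omega
    have h4 : max 4 (2 * PySem.Int.floordiv num (2 * 2 ^ D)) = 4 := by omega
    rw [h4]
    norm_num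
    ring
  · rw [if_neg hlt]
    rw [not_lt] at hlt
    have hq2 : 2 ≤ PySem.Int.floordiv num (2 * 2 ^ D) := by
      rw [hq]
      have h2 : ((2 : Int) : Rat) ≤ (num : Rat) / 2 ^ (D + 1) := by
        rw [le_div_iff₀ hpow1, pow_succ]
        push_cast
        nlinarith [(le_div_iff₀ hpow).mp hlt]
      exact Int.le_floor.mpr h2
    have h4 : max 4 (2 * PySem.Int.floordiv num (2 * 2 ^ D)) =
        2 * PySem.Int.floordiv num (2 * 2 ^ D) := by omega
    rw [h4, hhalf, hq]
    ring

theorem pv_foldset_getElem? (f : Int → Int) :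
    ∀ (L : List Nat) (l : List Int), L.Nodup →
    ∀ i : Nat, (L.foldl (fun xs d => xs.set d (f (xs.getD d 0))) l)[i]? =
      if i ∈ L then l[i]?.map f else l[i]? := by
  intro L
  induction L with
  | nil => intro l _ i; simp
  | cons d L ih =>
      intro l hnd i
      have hd : d ∉ L := (List.nodup_cons.mp hnd).1
      rw [List.foldl_cons, ih _ (List.nodup_cons.mp hnd).2 i]
      by_cases hiL : i ∈ L
      · have hne : d ≠ i := fun h => hd (h ▸ hiL)
        simp [hiL, hne, List.mem_cons]
      · by_cases hdi : i = d
        · subst hdi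
          simp only [hiL, if_false, List.mem_cons, true_or, if_true, List.getElem?_set]
          by_cases hlen : i < l.length
          · rw [if_pos hlen, List.getElem?_eq_getElem hlen, Option.map_some,
              List.getD_eq_getElem l 0 hlen]
          · rw [if_neg hlen, List.getElem?_eq_none_iff.mpr (by omega), Option.map_none]
        · have hne : d ≠ i := fun h => hdi h.symm
          simp [hiL, hne, List.mem_cons, hdi]

theorem pv_drop_range (n : Nat) : (List.range n).drop 1 = List.range' 1 (n - 1) := by
  cases n with
  | zero => simp
  | succ m => simp [List.range_eq_range', List.range'_succ]

theorem pv_mem_drop_range (n i : Nat) : i ∈ (List.range n).drop 1 ↔ 1 ≤ i ∧ i < n := by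
  rw [pv_drop_range, List.mem_range']
  constructor
  · rintro ⟨j, hj, rfl⟩
    omega
  · intro h
    exact ⟨i - 1, by omega, by omega⟩

-- ===== VERDICT (by name: the statement is the Claim_ definition above) =====
theorem getvalidinputsize_spec : Claim_equal_getvalidinputsize := by
  intro inp_shape depth k_size data_format _ hpre
  unfold Spec_getvalidinputsize getvalidinputsize getvalidinputsize_alt
  obtain ⟨hdf, _, _⟩ := hpre
  rw [if_neg (not_not_intro hdf), if_neg (not_not_intro hdf)]
  dsimp only
  rcases hdf with hdf | hdf <;> subst hdf
  · -- channels_first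
    simp only [String.reduceEq, reduceIte]
    apply List.ext_getElem?
    intro i
    rw [pv_foldset_getElem? (pvCalcA depth k_size) _ _
      ((List.drop_sublist 1 _).nodup List.nodup_range) i, List.getElem?_mapIdx]
    by_cases hmem : i ∈ (List.range inp_shape.length).drop 1
    · have hib := (pv_mem_drop_range inp_shape.length i).mp hmem
      rw [if_pos hmem, List.getElem?_eq_getElem hib.2, Option.map_some, Option.map_some]
      rw [if_neg (by omega), pv_calc_eq]
    · rw [if_neg hmem]
      by_cases hlen : i < inp_shape.length
      · have hi0 : i = 0 := by
          have hx := hmem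
          rw [pv_mem_drop_range] at hx
          omega
        rw [List.getElem?_eq_getElem hlen, Option.map_some, if_pos (by omega)]
      · rw [List.getElem?_eq_none_iff.mpr (by omega)]
        simp
  · -- channels_last
    rw [if_pos rfl, if_pos rfl]
    apply List.ext_getElem?
    intro i
    rw [pv_foldset_getElem? (pvCalcA depth k_size) _ _ List.nodup_range i, List.getElem?_mapIdx]
    by_cases hmem : i ∈ List.range (inp_shape.length - 1)
    · have hib := List.mem_range.mp hmem
      rw [if_pos hmem, List.getElem?_eq_getElem (by omega), Option.map_some, Option.map_some]
      rw [if_neg (by omega), pv_calc_eq]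
    · rw [if_neg hmem]
      by_cases hlen : i < inp_shape.length
      · have hi0 : i = inp_shape.length - 1 := by
          have hx := hmem
          rw [List.mem_range] at hx
          omega
        rw [List.getElem?_eq_getElem hlen, Option.map_some, if_pos (by omega)]
      · rw [List.getElem?_eq_none_iff.mpr (by omega)]
        simp
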